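-- pv_equiv track=rewrite | github.com/softstat/coding_test | 프로그래머스/1/42840. 모의고사/모의고사.py | solution
-- ===== SOURCE A (Python) =====
-- def solution(answers):
--     num1 = [1, 2, 3, 4, 5]
--     num2 = [2, 1, 2, 3, 2, 4, 2, 5]
--     num3 = [3, 3, 1, 1, 2, 2, 4, 4, 5, 5]
--     cor1, cor2, cor3 = 0, 0, 0
--     for i in range(len(answers)):
--         if answers[i] == num1[i % len(num1)]:
--             cor1 += 1
--         if answers[i] == num2[i % len(num2)]:
--             cor2 += 1
--         if answers[i] == num3[i % len(num3)]:
--             cor3 += 1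
--     max_score = max(cor1, cor2, cor3)
--     answer = []
--     if cor1 == max_score:
--         answer.append(1)
--     if cor2 == max_score:
--         answer.append(2)
--     if cor3 == max_score:
--         answer.append(3)
--
--     return answer
-- ===== SOURCE B (Python) =====
-- def solution(answers):
--     patterns = [[1, 2, 3, 4, 5],
--                 [2, 1, 2, 3, 2, 4, 2, 5],
--                 [3, 3, 1, 1, 2, 2, 4, 4, 5, 5]]
--     # All three patterns repeat with period dividing 40, so the score of a
--     # pattern depends only on the multiset of (index mod 40, answer) pairs.
--     hist = {}
--     for i, a in enumerate(answers):
--         k = (i % 40, a)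
--         hist[k] = hist.get(k, 0) + 1
--     scores = [sum(hist.get((r, p[r % len(p)]), 0) for r in range(40))
--               for p in patterns]
--     best = max(scores)
--     return [k + 1 for k in range(3) if scores[k] == best]
-- ===== Notes on version B (the rewrite author's own statement) =====
-- stated objective: alternative
-- what changed: Replaces A's fused scan that compares each answer against all three patterns and keeps three counters by a histogram pass: one dict counting (index mod 40, answer) pairs (40 = lcm of the pattern periods), after which each pattern's score is obtained by 40 table lookups instead of a scan.
import Mathlib
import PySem

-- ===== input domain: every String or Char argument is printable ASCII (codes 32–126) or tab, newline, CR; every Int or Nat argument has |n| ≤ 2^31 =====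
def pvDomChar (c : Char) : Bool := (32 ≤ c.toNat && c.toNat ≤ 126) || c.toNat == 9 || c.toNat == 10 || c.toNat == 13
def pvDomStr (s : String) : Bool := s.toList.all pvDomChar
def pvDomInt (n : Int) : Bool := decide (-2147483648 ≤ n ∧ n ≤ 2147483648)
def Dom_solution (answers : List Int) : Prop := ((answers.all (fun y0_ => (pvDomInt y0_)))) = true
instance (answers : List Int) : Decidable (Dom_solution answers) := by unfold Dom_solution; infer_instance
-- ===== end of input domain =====

-- B replaces A's fused three-counter comparison pass by a histogram of (index mod 40, answer)
-- pairs (all three patterns have period dividing 40), scoring each pattern by 40 table lookups.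

-- ===== PORT A =====
-- one pass over range(len(answers)) updating the three counters; answers[i] and numK[i % len(numK)]
-- are always in range (0 ≤ i < len), so pyGetD with default 0 is exact here
def solution (answers : List Int) : List Int :=
  let num1 : List Int := [1, 2, 3, 4, 5]
  let num2 : List Int := [2, 1, 2, 3, 2, 4, 2, 5]
  let num3 : List Int := [3, 3, 1, 1, 2, 2, 4, 4, 5, 5]
  let c := (PySem.List.pyRange 0 answers.length 1).foldl
    (fun (c : Int × Int × Int) i =>
      (if PySem.List.pyGetD answers i 0 = PySem.List.pyGetD num1 (PySem.Int.mod i num1.length) 0 then c.1 + 1 else c.1,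
       if PySem.List.pyGetD answers i 0 = PySem.List.pyGetD num2 (PySem.Int.mod i num2.length) 0 then c.2.1 + 1 else c.2.1,
       if PySem.List.pyGetD answers i 0 = PySem.List.pyGetD num3 (PySem.Int.mod i num3.length) 0 then c.2.2 + 1 else c.2.2))
    (0, 0, 0)
  let max_score := max c.1 (max c.2.1 c.2.2)
  (if c.1 = max_score then [1] else []) ++
  (if c.2.1 = max_score then [2] else []) ++
  (if c.2.2 = max_score then [3] else [])

-- ===== PORT B =====
-- hist[k] = hist.get(k, 0) + 1 over enumerate(answers), keyed by (i % 40, a);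
-- then each score is sum(hist.get((r, p[r % len(p)]), 0) for r in range(40))
def solution_alt (answers : List Int) : List Int :=
  let patterns : List (List Int) :=
    [[1, 2, 3, 4, 5], [2, 1, 2, 3, 2, 4, 2, 5], [3, 3, 1, 1, 2, 2, 4, 4, 5, 5]]
  let hist : PySem.Dict (Int × Int) Int :=
    (PySem.List.enumerate answers 0).foldl
      (fun d ia =>
        let k := (PySem.Int.mod ia.1 40, ia.2)
        d.insert k (d.getD k 0 + 1))
      PySem.Dict.empty
  let scores := patterns.map (fun p =>
    ((PySem.List.pyRange 0 40 1).map
      (fun r => hist.getD (r, PySem.List.pyGetD p (PySem.Int.mod r p.length) 0) 0)).sum)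
  -- scores is nonempty (three patterns), so max() is exact; getD is never taken
  let best := (PySem.List.max? scores (fun s => s)).getD 0
  (PySem.List.pyRange 0 3 1).filterMap
    (fun k => if PySem.List.pyGetD scores k 0 = best then some (k + 1) else none)

-- ===== PRECONDITION & SPEC =====
def Spec_solution (answers : List Int) (out : List Int) : Prop := out = solution_alt answers
instance (answers : List Int) (out : List Int) : Decidable (Spec_solution answers out) := by unfold Spec_solution; infer_instance

-- ===== CLAIM (what is proved, stated in full; the proofs are below) =====
def Claim_equal_solution : Prop := ∀ (answers : List Int), Dom_solution answers → Spec_solution answers (solution answers)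

-- ===== LEMMAS AND PROOFS =====

-- a fold over a triple componentwise is the triple of component folds
theorem foldl_prod3 {α : Type} (l : List α) (f g h : Int → α → Int) (a b c : Int) :
    l.foldl (fun (s : Int × Int × Int) x => (f s.1 x, g s.2.1 x, h s.2.2 x)) (a, b, c)
      = (l.foldl f a, l.foldl g b, l.foldl h c) := by
  induction l generalizing a b c with
  | nil => rfl
  | cons x t ih => simpa using ih (f a x) (g b x) (h c x)

-- A's per-pattern counter as a countP over enumerate(answers)
theorem countA_eq (answers p : List Int) :
    (PySem.List.pyRange 0 answers.length 1).foldl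
        (fun (acc : Int) i =>
          if PySem.List.pyGetD answers i 0
              = PySem.List.pyGetD p (PySem.Int.mod i p.length) 0
            then acc + 1 else acc) 0
      = ((PySem.List.enumerate answers 0).countP
          (fun ia => ia.2 = PySem.List.pyGetD p (PySem.Int.mod ia.1 p.length) 0) : Int) := by
  rw [PySem.List.enumerate_eq_map_pyRange (d := 0), List.countP_map]
  have h := PySem.List.foldl_count_if
      (fun i => decide (PySem.List.pyGetD answers i 0
        = PySem.List.pyGetD p (PySem.Int.mod i (p.length : Int)) 0))
      (PySem.List.pyRange 0 answers.length 1) 0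
  simp only [decide_eq_true_eq] at h
  rw [h, zero_add]
  exact congrArg _ (List.countP_congr (fun i _ => Iff.rfl))

-- if x.1 is not in rs, the indicator sum over rs vanishes
theorem ind_sum_zero (rs : List Int) (v : Int → Int) (x : Int × Int) (h : x.1 ∉ rs) :
    (rs.map (fun r => if x = (r, v r) then (1 : Int) else 0)).sum = 0 := by
  induction rs with
  | nil => rfl
  | cons r t ih =>
    have hne : x ≠ (r, v r) := by
      intro he; exact h (by rw [he]; exact List.mem_cons_self)
    simp [hne, ih (fun hm => h (List.mem_cons_of_mem _ hm))]

-- the indicator sum over a nodup list containing x.1 is the single test x.2 = v x.1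
theorem ind_sum (rs : List Int) (v : Int → Int) (x : Int × Int)
    (hnd : rs.Nodup) (hj : x.1 ∈ rs) :
    (rs.map (fun r => if x = (r, v r) then (1 : Int) else 0)).sum
      = if x.2 = v x.1 then 1 else 0 := by
  induction rs with
  | nil => cases hj
  | cons r t ih =>
    rcases List.mem_cons.mp hj with he | hm
    · have ht : x.1 ∉ t := by rw [he]; exact (List.nodup_cons.mp hnd).1
      subst he
      have hiff : (x = (x.1, v x.1)) ↔ x.2 = v x.1 := by simp [Prod.ext_iff]
      simp [hiff, ind_sum_zero t v x ht]
    · have hne : x ≠ (r, v r) := by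
        intro he
        have h1 : x.1 = r := by rw [he]
        exact (List.nodup_cons.mp hnd).1 (by rw [← h1]; exact hm)
      simp [hne, ih (List.nodup_cons.mp hnd).2 hm]

-- summing per-residue counts over a nodup residue list covering all keys is a single countP
theorem sum_count (rs : List Int) (hnd : rs.Nodup) (v : Int → Int) :
    ∀ (L : List (Int × Int)), (∀ x ∈ L, x.1 ∈ rs) →
    (rs.map (fun r => (L.count (r, v r) : Int))).sum
      = (L.countP (fun x => x.2 = v x.1) : Int) := by
  intro L
  induction L with
  | nil => intro _; simp
  | cons x t ih =>
    intro hmem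
    have hx : x.1 ∈ rs := hmem x List.mem_cons_self
    have hsplit : ∀ r : Int, (((x :: t).count (r, v r)) : Int)
        = (t.count (r, v r) : Int) + (if x = (r, v r) then (1 : Int) else 0) := by
      intro r; rw [List.count_cons]; push_cast; simp [beq_iff_eq]
    rw [List.map_congr_left (fun r _ => hsplit r), PySem.List.sum_map_add_int,
      ih (fun y hy => hmem y (List.mem_cons_of_mem _ hy)),
      ind_sum rs v x hnd hx, List.countP_cons]
    by_cases h2 : x.2 = v x.1 <;> simp [h2]

-- B's score for a pattern whose length divides 40 is the same countP over enumerate(answers)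
theorem scoreB_eq (answers p : List Int) (hp : 0 < p.length) (hd : (p.length : Int) ∣ 40) :
    ((PySem.List.pyRange 0 40 1).map
        (fun r => ((PySem.List.enumerate answers 0).foldl
            (fun (d : PySem.Dict (Int × Int) Int) ia =>
              d.insert (PySem.Int.mod ia.1 40, ia.2)
                (d.getD (PySem.Int.mod ia.1 40, ia.2) 0 + 1))
            PySem.Dict.empty).getD
          (r, PySem.List.pyGetD p (PySem.Int.mod r p.length) 0) 0)).sum
      = ((PySem.List.enumerate answers 0).countP
          (fun ia => ia.2 = PySem.List.pyGetD p (PySem.Int.mod ia.1 p.length) 0) : Int) := by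
  have hhist : (PySem.List.enumerate answers 0).foldl
      (fun (d : PySem.Dict (Int × Int) Int) ia =>
        d.insert (PySem.Int.mod ia.1 40, ia.2)
          (d.getD (PySem.Int.mod ia.1 40, ia.2) 0 + 1))
      PySem.Dict.empty
      = PySem.Dict.counter
          ((PySem.List.enumerate answers 0).map (fun ia => (PySem.Int.mod ia.1 40, ia.2))) := by
    rw [← PySem.Dict.foldl_insert_getD_add_one_eq_counter, List.foldl_map]
  rw [hhist]
  have hmod : ∀ i : Int, PySem.Int.mod (PySem.Int.mod i 40) p.length = PySem.Int.mod i p.length := by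
    intro i
    have h40 : (0 : Int) < 40 := by norm_num
    have hl : (0 : Int) < (p.length : Int) := by exact_mod_cast hp
    rw [PySem.Int.mod_eq_emod_of_pos h40, PySem.Int.mod_eq_emod_of_pos hl,
      PySem.Int.mod_eq_emod_of_pos hl, Int.emod_emod_of_dvd _ hd]
  have hmem : ∀ x ∈ (PySem.List.enumerate answers 0).map
      (fun ia => (PySem.Int.mod ia.1 40, ia.2)), x.1 ∈ PySem.List.pyRange 0 40 1 := by
    intro x hxm
    rcases List.mem_map.mp hxm with ⟨ia, _, rfl⟩
    rw [PySem.List.mem_pyRange_one]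
    exact ⟨PySem.Int.mod_nonneg _ (by norm_num), PySem.Int.mod_lt _ (by norm_num)⟩
  rw [congrArg List.sum (List.map_congr_left
      (fun r _ => PySem.Dict.getD_counter _ (r, PySem.List.pyGetD p (PySem.Int.mod r p.length) 0))),
    sum_count _ (PySem.List.nodup_pyRange_one 0 40) _ _ hmem, List.countP_map]
  exact congrArg _ (List.countP_congr (fun ia _ => by
    simp only [Function.comp_apply, decide_eq_true_eq, hmod ia.1]))

set_option maxRecDepth 4000 in
-- the final assembly step on three abstract scores
theorem final3 (s1 s2 s3 : Int) :
    (if s1 = max s1 (max s2 s3) then [1] else []) ++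
      (if s2 = max s1 (max s2 s3) then [2] else []) ++
      (if s3 = max s1 (max s2 s3) then ([3] : List Int) else [])
    = (PySem.List.pyRange 0 3 1).filterMap
        (fun k => if PySem.List.pyGetD [s1, s2, s3] k 0
            = (PySem.List.max? [s1, s2, s3] (fun s => s)).getD 0
          then some (k + 1) else none) := by
  have hr : PySem.List.pyRange 0 3 1 = [0, 1, 2] := by decide
  rw [hr]
  simp only [PySem.List.max?_id_cons, List.foldl, Option.getD_some, List.filterMap]
  have hm : max (max s1 s2) s3 = max s1 (max s2 s3) := max_assoc s1 s2 s3
  rw [hm]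
  have h0 : PySem.List.pyGetD [s1, s2, s3] (0 : Int) (0 : Int) = s1 := rfl
  have h1 : PySem.List.pyGetD [s1, s2, s3] (1 : Int) (0 : Int) = s2 := rfl
  have h2 : PySem.List.pyGetD [s1, s2, s3] (2 : Int) (0 : Int) = s3 := rfl
  rw [h0, h1, h2]
  obtain ⟨M, hM⟩ : ∃ M : Int, max s1 (max s2 s3) = M := ⟨_, rfl⟩
  rw [hM]
  by_cases b1 : s1 = M <;> by_cases b2 : s2 = M <;> by_cases b3 : s3 = M <;>
    simp [b1, b2, b3]

-- ===== VERDICT (by name: the statement is the Claim_ definition above) =====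
theorem solution_spec : Claim_equal_solution := by
  intro answers _
  show solution answers = solution_alt answers
  unfold solution solution_alt
  dsimp only
  rw [foldl_prod3 _
    (fun (a : Int) i => if PySem.List.pyGetD answers i 0 = PySem.List.pyGetD [1, 2, 3, 4, 5] (PySem.Int.mod i ((([1, 2, 3, 4, 5] : List Int).length : Int))) 0 then a + 1 else a)
    (fun (a : Int) i => if PySem.List.pyGetD answers i 0 = PySem.List.pyGetD [2, 1, 2, 3, 2, 4, 2, 5] (PySem.Int.mod i ((([2, 1, 2, 3, 2, 4, 2, 5] : List Int).length : Int))) 0 then a + 1 else a)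
    (fun (a : Int) i => if PySem.List.pyGetD answers i 0 = PySem.List.pyGetD [3, 3, 1, 1, 2, 2, 4, 4, 5, 5] (PySem.Int.mod i ((([3, 3, 1, 1, 2, 2, 4, 4, 5, 5] : List Int).length : Int))) 0 then a + 1 else a)]
  simp only [List.map_cons, List.map_nil]
  simp only [countA_eq answers,
    scoreB_eq answers [1, 2, 3, 4, 5] (by decide) (by decide),
    scoreB_eq answers [2, 1, 2, 3, 2, 4, 2, 5] (by decide) (by decide),
    scoreB_eq answers [3, 3, 1, 1, 2, 2, 4, 4, 5, 5] (by decide) (by decide)]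
  exact final3 _ _ _
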